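-- pv_equiv track=rewrite | github.com/domenicvacanti/Computer-Science-Fundamentals | DiscussionAssignments/ds3.py | hasThreeConsecPairs
-- ===== SOURCE A (Python) =====
-- def hasThreeConsecPairs(word):
--     result = False
--     index = 0
--     while (index + 5) < len(word):
--         if ((word[index] == word[index + 1]) and
--             (word[index + 2] == word[index + 3]) and
--             (word[index + 4] == word[index + 5])):
--             result = True
--             break
--         index = index + 1
--     return result
-- ===== SOURCE B (Python) =====
-- def hasThreeConsecPairs(word):
--     # single-pass streak automaton: count consecutive equal-pair hits per parity
--     cur = 0
--     other = 0
--     for i in range(len(word) - 1):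
--         if word[i] == word[i + 1]:
--             cur += 1
--             if cur == 3:
--                 return True
--         else:
--             cur = 0
--         cur, other = other, cur
--     return False
-- ===== Notes on version B (the rewrite author's own statement) =====
-- stated objective: alternative
-- what changed: A's sliding 6-char window scan (re-checking three pairs per start index) is replaced by a single-pass streak automaton that walks the string once keeping two parity-indexed counters of consecutive equal-adjacent-pair hits and fires when a counter reaches 3.
import Mathlib
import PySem

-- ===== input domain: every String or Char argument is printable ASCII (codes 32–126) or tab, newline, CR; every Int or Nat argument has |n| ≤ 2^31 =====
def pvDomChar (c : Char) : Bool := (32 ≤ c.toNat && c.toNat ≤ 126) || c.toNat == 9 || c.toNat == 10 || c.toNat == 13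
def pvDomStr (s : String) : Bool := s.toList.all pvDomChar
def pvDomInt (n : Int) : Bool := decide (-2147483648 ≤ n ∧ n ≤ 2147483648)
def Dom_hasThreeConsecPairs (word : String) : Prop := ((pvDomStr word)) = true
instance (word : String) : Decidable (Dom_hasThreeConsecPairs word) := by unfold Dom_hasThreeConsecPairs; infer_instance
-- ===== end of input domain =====

-- B replaces A's sliding-window scan by a one-pass streak automaton with two parity counters; equivalence proved on all strings.


-- ===== PORT A =====
-- A's while loop with break, as structural recursion on the remaining length.
-- Accesses word[index+k] are guarded by index+5 < length, so getD is exact here.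
def hasThreeConsecPairsLoopA (cs : List Char) (index : Nat) : Bool :=
  if _h : index + 5 < cs.length then
    if (cs.getD index ' ' == cs.getD (index + 1) ' ') &&
       (cs.getD (index + 2) ' ' == cs.getD (index + 3) ' ') &&
       (cs.getD (index + 4) ' ' == cs.getD (index + 5) ' ') then
      true
    else
      hasThreeConsecPairsLoopA cs (index + 1)
  else
    false
termination_by cs.length - index
decreasing_by omega

def hasThreeConsecPairs (word : String) : Bool :=
  hasThreeConsecPairsLoopA word.toList 0

-- ===== PORT B =====
-- Source B's for-loop over i in range(len(word)-1) with the counters cur/other swapped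
-- each iteration and an early return, as index recursion; i runs while i+1 < length,
-- so the getD accesses at i and i+1 are exact.
def hasThreeConsecPairsLoopB (cs : List Char) (i cur other : Nat) : Bool :=
  if _h : i + 1 < cs.length then
    if cs.getD i ' ' == cs.getD (i + 1) ' ' then
      if cur + 1 == 3 then true
      else hasThreeConsecPairsLoopB cs (i + 1) other (cur + 1)
    else hasThreeConsecPairsLoopB cs (i + 1) other 0
  else
    false
termination_by cs.length - i
decreasing_by all_goals omega

def hasThreeConsecPairs_alt (word : String) : Bool :=
  hasThreeConsecPairsLoopB word.toList 0 0 0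

-- ===== PRECONDITION & SPEC =====
def Spec_hasThreeConsecPairs (word : String) (out : Bool) : Prop := out = hasThreeConsecPairs_alt word
instance (word : String) (out : Bool) : Decidable (Spec_hasThreeConsecPairs word out) := by unfold Spec_hasThreeConsecPairs; infer_instance

-- ===== CLAIM (what is proved, stated in full; the proofs are below) =====
def Claim_equal_hasThreeConsecPairs : Prop := ∀ (word : String), Dom_hasThreeConsecPairs word → Spec_hasThreeConsecPairs word (hasThreeConsecPairs word)

-- ===== LEMMAS AND PROOFS =====

-- word[j] == word[j+1]
def pvPair (cs : List Char) (j : Nat) : Bool :=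
  cs.getD j ' ' == cs.getD (j + 1) ' '

-- k consecutive equal pairs at stride 2 starting at j, last access in range
def pvChain (cs : List Char) (j k : Nat) : Prop :=
  j + 2 * k ≤ cs.length ∧ ∀ t < k, pvPair cs (j + 2 * t) = true

theorem pvChain_mono {cs : List Char} {j k k' : Nat} (h : k' ≤ k)
    (hc : pvChain cs j k) : pvChain cs j k' := by
  obtain ⟨hr, hp⟩ := hc
  exact ⟨by omega, fun t ht => hp t (by omega)⟩

theorem pvChain_succ (cs : List Char) (j k : Nat) :
    pvChain cs j (k + 1) ↔ pvPair cs j = true ∧ pvChain cs (j + 2) k := by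
  constructor
  · rintro ⟨hr, hp⟩
    refine ⟨by simpa using hp 0 (by omega), by omega, fun t ht => ?_⟩
    have := hp (t + 1) (by omega)
    have he : j + 2 * (t + 1) = j + 2 + 2 * t := by ring
    rwa [he] at this
  · rintro ⟨h0, hr, hp⟩
    refine ⟨by omega, fun t ht => ?_⟩
    cases t with
    | zero => simpa using h0
    | succ s =>
      have := hp s (by omega)
      have he : j + 2 + 2 * s = j + 2 * (s + 1) := by ring
      rwa [he] at this

theorem pvChain_three (cs : List Char) (j : Nat) :
    pvChain cs j 3 ↔ j + 5 < cs.length ∧ pvPair cs j = true ∧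
      pvPair cs (j + 2) = true ∧ pvPair cs (j + 4) = true := by
  constructor
  · rintro ⟨hr, hp⟩
    exact ⟨by omega, by simpa using hp 0 (by omega), by simpa using hp 1 (by omega),
      by simpa using hp 2 (by omega)⟩
  · rintro ⟨hr, h0, h1, h2⟩
    refine ⟨by omega, fun t ht => ?_⟩
    interval_cases t <;> simpa using ‹_›

-- A's loop returns true iff a full 6-char window starts at some j ≥ index
theorem loopA_iff (cs : List Char) (index : Nat) :
    hasThreeConsecPairsLoopA cs index = true ↔ ∃ j, index ≤ j ∧ pvChain cs j 3 := by
  generalize hn : cs.length - index = n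
  induction n generalizing index with
  | zero =>
    rw [hasThreeConsecPairsLoopA]
    have h : ¬ index + 5 < cs.length := by omega
    simp only [dif_neg h, Bool.false_eq_true, false_iff]
    rintro ⟨j, hij, hc⟩
    have := (pvChain_three cs j).mp hc
    omega
  | succ k ih =>
    rw [hasThreeConsecPairsLoopA]
    by_cases h : index + 5 < cs.length
    · simp only [dif_pos h]
      by_cases hc : ((cs.getD index ' ' == cs.getD (index + 1) ' ') &&
         (cs.getD (index + 2) ' ' == cs.getD (index + 3) ' ') &&
         (cs.getD (index + 4) ' ' == cs.getD (index + 5) ' ')) = true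
      · rw [if_pos hc]
        simp only [true_iff]
        refine ⟨index, le_refl _, (pvChain_three cs index).mpr ?_⟩
        simp only [Bool.and_eq_true] at hc
        exact ⟨h, hc.1.1, by simpa [pvPair, Nat.add_assoc] using hc.1.2,
          by simpa [pvPair, Nat.add_assoc] using hc.2⟩
      · rw [if_neg hc]
        rw [ih (index + 1) (by omega)]
        constructor
        · rintro ⟨j, hij, hcj⟩; exact ⟨j, by omega, hcj⟩
        · rintro ⟨j, hij, hcj⟩
          refine ⟨j, ?_, hcj⟩
          rcases Nat.lt_or_ge index j with hlt | hge
          · omega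
          · exfalso
            have hj : j = index := by omega
            subst hj
            have := (pvChain_three cs j).mp hcj
            apply hc
            simp only [Bool.and_eq_true]
            exact ⟨⟨this.2.1, by simpa [pvPair, Nat.add_assoc] using this.2.2.1⟩,
              by simpa [pvPair, Nat.add_assoc] using this.2.2.2⟩
    · simp only [dif_neg h, Bool.false_eq_true, false_iff]
      rintro ⟨j, hij, hcj⟩
      have := (pvChain_three cs j).mp hcj
      omega

-- invariant of B's automaton: with streaks cur/other ≤ 2, the loop from i returns
-- true iff the cur-streak completes at i, the other-streak completes at i+1, or a
-- fresh full chain of three pairs starts at some j ≥ i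
theorem loopB_iff (cs : List Char) (i cur other : Nat)
    (hc : cur ≤ 2) (ho : other ≤ 2) :
    hasThreeConsecPairsLoopB cs i cur other = true ↔
      pvChain cs i (3 - cur) ∨ pvChain cs (i + 1) (3 - other) ∨
        ∃ j, i ≤ j ∧ pvChain cs j 3 := by
  generalize hn : cs.length - i = n
  induction n generalizing i cur other with
  | zero =>
    rw [hasThreeConsecPairsLoopB]
    have h : ¬ i + 1 < cs.length := by omega
    simp only [dif_neg h, Bool.false_eq_true, false_iff]
    rintro (⟨hr, _⟩ | ⟨hr, _⟩ | ⟨j, hij, ⟨hr, _⟩⟩) <;> omega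
  | succ k ih =>
    rw [hasThreeConsecPairsLoopB]
    by_cases h : i + 1 < cs.length
    · simp only [dif_pos h]
      by_cases hp : (cs.getD i ' ' == cs.getD (i + 1) ' ') = true
      · rw [if_pos hp]
        by_cases h3 : cur + 1 = 3
        · have hcur : cur = 2 := by omega
          subst hcur
          simp only [if_pos (by simp : (2 + 1 == 3) = true), true_iff]
          left
          exact ⟨by omega, fun t ht => by
            have ht0 : t = 0 := by omega
            subst ht0; simpa [pvPair] using hp⟩
        · rw [if_neg (by simpa using h3)]
          rw [ih (i + 1) other (cur + 1) ho (by omega) (by omega)]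
          have hshift : pvChain cs i (3 - cur) ↔ pvChain cs (i + 2) (3 - (cur + 1)) := by
            have he : 3 - cur = (3 - (cur + 1)) + 1 := by omega
            rw [he, pvChain_succ]
            constructor
            · rintro ⟨_, h2⟩; exact h2
            · intro h2; exact ⟨by simpa [pvPair] using hp, h2⟩
          constructor
          · rintro (h1 | h1 | ⟨j, hij, hcj⟩)
            · right; left; exact h1
            · left; exact hshift.mpr h1
            · right; right; exact ⟨j, by omega, hcj⟩
          · rintro (h1 | h1 | ⟨j, hij, hcj⟩)
            · right; left; exact hshift.mp h1
            · left; exact h1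
            · rcases Nat.lt_or_ge i j with hlt | hge
              · right; right; exact ⟨j, by omega, hcj⟩
              · have hj : j = i := by omega
                subst hj
                right; left
                exact hshift.mp (pvChain_mono (by omega) hcj)
      · rw [if_neg hp]
        rw [ih (i + 1) other 0 ho (by omega) (by omega)]
        constructor
        · rintro (h1 | h1 | ⟨j, hij, hcj⟩)
          · right; left; exact h1
          · right; right; exact ⟨i + 2, by omega, h1⟩
          · right; right; exact ⟨j, by omega, hcj⟩
        · rintro (h1 | h1 | ⟨j, hij, hcj⟩)
          · exfalso
            have he : 3 - cur = (3 - (cur + 1)) + 1 := by omega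
            rw [he, pvChain_succ] at h1
            exact hp (by simpa [pvPair] using h1.1)
          · left; exact h1
          · rcases Nat.lt_or_ge i j with hlt | hge
            · right; right; exact ⟨j, by omega, hcj⟩
            · exfalso
              have hj : j = i := by omega
              subst hj
              have := (pvChain_three cs j).mp hcj
              exact hp (by simpa [pvPair] using this.2.1)
    · simp only [dif_neg h, Bool.false_eq_true, false_iff]
      rintro (⟨hr, _⟩ | ⟨hr, _⟩ | ⟨j, hij, ⟨hr, _⟩⟩) <;> omega

-- ===== VERDICT (by name: the statement is the Claim_ definition above) =====
theorem hasThreeConsecPairs_spec : Claim_equal_hasThreeConsecPairs := by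
  intro word _
  unfold Spec_hasThreeConsecPairs hasThreeConsecPairs hasThreeConsecPairs_alt
  have hA := loopA_iff word.toList 0
  have hB := loopB_iff word.toList 0 0 0 (by omega) (by omega)
  have hiff : hasThreeConsecPairsLoopA word.toList 0 = true ↔
      hasThreeConsecPairsLoopB word.toList 0 0 0 = true := by
    rw [hA, hB]
    constructor
    · rintro ⟨j, hij, hcj⟩
      right; right; exact ⟨j, hij, hcj⟩
    · rintro (h1 | h1 | ⟨j, hij, hcj⟩)
      · exact ⟨0, by omega, h1⟩
      · exact ⟨1, by omega, h1⟩
      · exact ⟨j, hij, hcj⟩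
  cases hx : hasThreeConsecPairsLoopA word.toList 0 with
  | true => exact (hiff.mp hx).symm
  | false =>
    cases hy : hasThreeConsecPairsLoopB word.toList 0 0 0 with
    | false => rfl
    | true => exact absurd (hiff.mpr hy) (by simp [hx])
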